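-- pv_equiv track=rewrite | github.com/yuvrajiro/MART | utils.py | streak_weight
-- ===== SOURCE A (Python) =====
-- def streak_weight(arr):
--     """
--     This function defines a streak as a run of consecutive increments or decrements.
--     It returns an array of the same length as the input, where each element is the
--     number of consecutive equal‐sign differences starting at that position.
--     The last element always gets a weight of 1.
--
--     Example:
--         >>> streak_weight([1, 2, 3, 2, 1])
--         [2, 1, 2, 1, 1]
--     """
--     n = len(arr)
--     if n == 0:
--         return []
--
--     weights = []
--     for i in range(n - 1):
--         diff = arr[i+1] - arr[i]
--         # no increment/decrement → no streak beyond itself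
--         if diff == 0:
--             weights.append(1)
--             continue
--
--         # determine streak sign (+1 or -1)
--         sign = 1 if diff > 0 else -1
--         count = 1  # we've already got one diff of this sign
--
--         # extend forward as long as diffs have the same sign
--         for j in range(i+1, n - 1):
--             next_diff = arr[j+1] - arr[j]
--             next_sign = 1 if next_diff > 0 else -1 if next_diff < 0 else 0
--             if next_sign == sign:
--                 count += 1
--             else:
--                 break
--
--         weights.append(count)
--
--     # last element: no forward neighbor → streak weight of 1
--     weights.append(1)
--     return weights
-- ===== SOURCE B (Python) =====
-- def streak_weight(arr):
--     n = len(arr)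
--     if n == 0:
--         return []
--     res = [1]
--     prev_s = 0
--     prev_c = 0
--     for i in range(n - 2, -1, -1):
--         d = arr[i + 1] - arr[i]
--         s = 1 if d > 0 else -1 if d < 0 else 0
--         c = prev_c + 1 if s != 0 and s == prev_s else 1
--         res.append(c)
--         prev_s = s
--         prev_c = c
--     res.reverse()
--     return res
-- ===== Notes on version B (the rewrite author's own statement) =====
-- stated objective: alternative
-- what changed: Replaced the nested forward rescans (for each index, re-walk the following same-sign diffs) by a single right-to-left pass carrying the previous diff sign and streak count.
import Mathlib
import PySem

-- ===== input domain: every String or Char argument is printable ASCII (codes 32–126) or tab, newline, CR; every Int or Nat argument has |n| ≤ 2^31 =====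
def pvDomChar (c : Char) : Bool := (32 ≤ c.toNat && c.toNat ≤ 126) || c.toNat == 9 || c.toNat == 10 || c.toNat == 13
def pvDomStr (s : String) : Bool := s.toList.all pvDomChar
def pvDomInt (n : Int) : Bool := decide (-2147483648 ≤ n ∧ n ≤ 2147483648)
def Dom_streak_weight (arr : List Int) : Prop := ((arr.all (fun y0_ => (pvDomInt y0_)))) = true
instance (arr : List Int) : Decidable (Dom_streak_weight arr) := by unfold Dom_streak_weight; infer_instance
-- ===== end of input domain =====

-- B replaces A's nested forward rescans by one right-to-left pass carrying the previous sign and count.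

-- ===== PORT A =====
-- inner loop `for j in range(i+1, n-1): … else break`: j walks the suffix arr[j:],
-- next_diff = arr[j+1] - arr[j] is the difference of its first two elements
def swInner (sgn : Int) (count : Int) : List Int → Int
  | a :: b :: rest =>
      let next_diff := b - a
      let next_sign : Int := if next_diff > 0 then 1 else if next_diff < 0 then -1 else 0
      if next_sign = sgn then swInner sgn (count + 1) (b :: rest) else count
  | _ => count

-- outer loop `for i in range(n-1): … weights.append(…)`: i walks the suffix arr[i:]
def swOuter : List Int → List Int
  | a :: b :: rest =>
      let diff := b - a
      if diff = 0 then 1 :: swOuter (b :: rest)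
      else
        let sgn : Int := if diff > 0 then 1 else -1
        swInner sgn 1 (b :: rest) :: swOuter (b :: rest)
  | _ => []

def streak_weight (arr : List Int) : List Int :=
  if arr.length = 0 then [] else swOuter arr ++ [1]

-- ===== PORT B =====
-- the loop `for i in range(n-2, -1, -1)` plus the final reverse: the iteration at i
-- consumes the suffix arr[i:]; state = (answers for positions ≥ i+1, prev_s, prev_c)
def swAltLoop : List Int → (List Int × Int × Int)
  | a :: b :: rest =>
      let st := swAltLoop (b :: rest)
      let d := b - a
      let s : Int := if d > 0 then 1 else if d < 0 then -1 else 0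
      let c : Int := if s ≠ 0 ∧ s = st.2.1 then st.2.2 + 1 else 1
      (c :: st.1, s, c)
  | [_] => ([1], 0, 0)
  | [] => ([], 0, 0)

def streak_weight_alt (arr : List Int) : List Int :=
  if arr.length = 0 then [] else (swAltLoop arr).1

-- ===== PRECONDITION & SPEC =====
def Spec_streak_weight (arr : List Int) (out : List Int) : Prop := out = streak_weight_alt arr
instance (arr : List Int) (out : List Int) : Decidable (Spec_streak_weight arr out) := by unfold Spec_streak_weight; infer_instance

-- ===== CLAIM (what is proved, stated in full; the proofs are below) =====
def Claim_equal_streak_weight : Prop := ∀ (arr : List Int), Dom_streak_weight arr → Spec_streak_weight arr (streak_weight arr)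

-- ===== LEMMAS AND PROOFS =====

def sgnI (d : Int) : Int := if d > 0 then 1 else if d < 0 then -1 else 0

theorem swInner_shift (sgn c : Int) (l : List Int) :
    swInner sgn (c + 1) l = swInner sgn c l + 1 := by
  induction l generalizing c with
  | nil => rfl
  | cons a t ih =>
    cases t with
    | nil => rfl
    | cons b rest =>
      rw [swInner, swInner]
      by_cases h : (if b - a > 0 then (1 : Int) else if b - a < 0 then -1 else 0) = sgn
      · rw [if_pos h, if_pos h]
        exact ih (c + 1)
      · rw [if_neg h, if_neg h]

-- the head weight A computes for a two-or-more element suffix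
def wHead (a b : Int) (rest : List Int) : Int :=
  if b - a = 0 then 1 else swInner (if b - a > 0 then 1 else -1) 1 (b :: rest)

theorem swOuter_cons (a b : Int) (rest : List Int) :
    swOuter (a :: b :: rest) = wHead a b rest :: swOuter (b :: rest) := by
  rw [swOuter, wHead]
  split <;> rfl

theorem sgnI_ne (d : Int) (h : d ≠ 0) : sgnI d = (if d > 0 then (1 : Int) else -1) := by
  unfold sgnI
  by_cases hp : d > 0
  · rw [if_pos hp, if_pos hp]
  · rw [if_neg hp, if_neg hp, if_pos (by omega)]

theorem sgnI_ne_zero (d : Int) (h : d ≠ 0) : sgnI d ≠ 0 := by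
  rw [sgnI_ne d h]; split <;> omega

-- B's loop state after processing the suffix a :: l
def prevSOf (a : Int) (l : List Int) : Int :=
  match l with | [] => 0 | b :: _ => sgnI (b - a)
def prevCOf (a : Int) (l : List Int) : Int :=
  match l with | [] => 0 | b :: rest => wHead a b rest

theorem altLoop_fst (a b : Int) (rest : List Int) :
    (swAltLoop (a :: b :: rest)).1
      = (swAltLoop (a :: b :: rest)).2.2 :: (swAltLoop (b :: rest)).1 := rfl

theorem altLoop_snd1 (a b : Int) (rest : List Int) :
    (swAltLoop (a :: b :: rest)).2.1 = sgnI (b - a) := rfl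

theorem altLoop_snd2 (a b : Int) (rest : List Int) :
    (swAltLoop (a :: b :: rest)).2.2
      = (if sgnI (b - a) ≠ 0 ∧ sgnI (b - a) = (swAltLoop (b :: rest)).2.1
         then (swAltLoop (b :: rest)).2.2 + 1 else 1) := rfl

theorem swInner_two (s a b : Int) (rest : List Int) :
    swInner s 1 (a :: b :: rest)
      = (if sgnI (b - a) = s then swInner s (1 + 1) (b :: rest) else 1) := rfl

-- the full invariant of B's right-to-left pass, by structural induction
theorem swAltLoop_inv (a : Int) (l : List Int) :
    (swAltLoop (a :: l)).1 = swOuter (a :: l) ++ [1]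
    ∧ (swAltLoop (a :: l)).2.1 = prevSOf a l
    ∧ (swAltLoop (a :: l)).2.2 = prevCOf a l := by
  induction l generalizing a with
  | nil => exact ⟨rfl, rfl, rfl⟩
  | cons b rest ih =>
    obtain ⟨ih1, ih2, ih3⟩ := ih b
    have hc : (swAltLoop (a :: b :: rest)).2.2 = prevCOf a (b :: rest) := by
      rw [altLoop_snd2, ih2, ih3]
      show _ = wHead a b rest
      by_cases hd : b - a = 0
      · have hz : sgnI (b - a) = 0 := by rw [hd]; rfl
        rw [wHead, if_pos hd, if_neg (by simp [hz])]
      · have hs0 := sgnI_ne_zero _ hd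
        rw [wHead, if_neg hd, ← sgnI_ne _ hd]
        cases rest with
        | nil =>
          rw [if_neg (by rintro ⟨_, h⟩; exact hs0 h)]
          rfl
        | cons c0 r =>
          rw [swInner_two]
          by_cases hq : sgnI (b - a) = sgnI (c0 - b)
          · have hd2 : c0 - b ≠ 0 := fun h0 => hs0 (by rw [hq, h0]; rfl)
            rw [if_pos (⟨hs0, hq⟩ : sgnI (b - a) ≠ 0 ∧ sgnI (b - a) = prevSOf b (c0 :: r))]
            rw [if_pos hq.symm, swInner_shift]
            rw [show prevCOf b (c0 :: r) = wHead b c0 r from rfl]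
            rw [wHead, if_neg hd2, ← sgnI_ne _ hd2, ← hq]
          · rw [if_neg (by rintro ⟨_, h⟩; exact hq h)]
            rw [if_neg (fun h => hq h.symm)]
    refine ⟨?_, altLoop_snd1 a b rest, hc⟩
    rw [altLoop_fst, ih1, hc, swOuter_cons]
    rfl

theorem main_eq (arr : List Int) : streak_weight arr = streak_weight_alt arr := by
  unfold streak_weight streak_weight_alt
  cases arr with
  | nil => rfl
  | cons a l =>
    rw [if_neg (by simp), if_neg (by simp)]
    exact ((swAltLoop_inv a l).1).symm
-- ===== VERDICT (by name: the statement is the Claim_ definition above) =====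
theorem streak_weight_spec : Claim_equal_streak_weight := by
  intro arr _
  unfold Spec_streak_weight
  exact main_eq arr
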